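-- pv_equiv track=rewrite | github.com/qinacme/qinacme-interview | 2018FT/google_oa.py | group_gt_1
-- ===== SOURCE A (Python) =====
-- def group_gt_1(L):
--     if L == []:
--         return 0
--     def clean_email(email):
--         at_idx = email.index('@')
--         name = email[:at_idx].replace('.', '')
--         if '+' in name:
--             name = name[:name.index('+')]
--         return name+email[at_idx:]
--     my_map = {}
--     for email in L:
--         cleaned_email = clean_email(email)
--         if cleaned_email not in my_map:
--             my_map[cleaned_email] = [email]
--         else:
--             my_map[cleaned_email].append(email)
--     cnt = 0
--     for group in my_map.values():
--         if len(group) > 1: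
--             cnt = cnt + 1
--     return cnt
-- ===== SOURCE B (Python) =====
-- def group_gt_1(L):
--     def clean_email(email):
--         at_idx = email.index('@')
--         name = email[:at_idx].replace('.', '')
--         if '+' in name:
--             name = name[:name.index('+')]
--         return name + email[at_idx:]
--     names = sorted(clean_email(e) for e in L)
--     cnt = 0
--     cur = None
--     run = 0
--     for n in names:
--         if cur is not None and n == cur:
--             run += 1
--         else:
--             if run > 1:
--                 cnt += 1
--             cur = n
--             run = 1
--     if run > 1:
--         cnt += 1
--     return cnt
-- ===== Notes on version B (the rewrite author's own statement) =====
-- stated objective: alternative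
-- what changed: B replaces A's dict-of-lists grouping plus second pass over the group values by sorting the normalized names once and counting, in a single run-length scan over the sorted list, the runs of length greater than one.
import Mathlib
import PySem

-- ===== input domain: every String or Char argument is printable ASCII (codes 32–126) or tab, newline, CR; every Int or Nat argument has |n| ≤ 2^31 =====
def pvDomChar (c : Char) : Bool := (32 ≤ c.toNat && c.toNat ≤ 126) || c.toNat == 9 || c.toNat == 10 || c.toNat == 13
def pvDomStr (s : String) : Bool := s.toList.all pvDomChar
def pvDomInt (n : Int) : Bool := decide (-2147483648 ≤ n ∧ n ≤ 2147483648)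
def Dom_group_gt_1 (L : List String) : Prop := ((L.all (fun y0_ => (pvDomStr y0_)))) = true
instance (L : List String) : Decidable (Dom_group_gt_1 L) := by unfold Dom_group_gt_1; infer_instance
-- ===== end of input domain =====

-- B replaces A's dict-of-lists grouping and second pass over the group values by a single
-- run-length scan over the SORTED list of normalized names (objective: alternative).

-- shared helper: the inner clean_email, identical in Source A and Source B
-- (none = the ValueError Python's email.index('@') raises when '@' is absent)
def cleanEmail (email : String) : Option String :=
  let cs := email.toList
  let atIdx := PySem.Chars.find cs ['@']
  if atIdx = -1 then none
  else
    let name := PySem.Chars.replace (PySem.Chars.slice cs none (some atIdx)) ['.'] []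
    let name1 := if PySem.Chars.isIn ['+'] name then
        PySem.Chars.slice name none (some (PySem.Chars.find name ['+'])) else name
    some (String.ofList (name1 ++ PySem.Chars.slice cs (some atIdx) none))

-- ===== PORT A =====
def group_gt_1 (L : List String) : Int :=
  if L = [] then 0
  else
    let d := L.foldl (fun d email =>
      match cleanEmail email with
      | none => d          -- unreachable under Pre_ (Python raises here)
      | some c =>
        if d.contains c = false then d.insert c [email]
        else d.modify c [] (fun g => g ++ [email]))
      PySem.Dict.empty
    d.values.foldl (fun cnt g => if g.length > 1 then cnt + 1 else cnt) 0

-- ===== PORT B =====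
-- the body of Source B's for-loop over the sorted names: (cur, run, cnt)
def stepB (st : Option String × Int × Int) (n : String) : Option String × Int × Int :=
  match st with
  | (some c, run, cnt) =>
      if n = c then (some c, run + 1, cnt)
      else (some n, 1, if run > 1 then cnt + 1 else cnt)
  | (none, run, cnt) => (some n, 1, if run > 1 then cnt + 1 else cnt)

def group_gt_1_alt (L : List String) : Int :=
  match L.mapM cleanEmail with
  | none => 0              -- unreachable under Pre_ (Python raises here)
  | some ns =>
    let names := PySem.List.sorted ns (fun x => x) false
    let st := names.foldl stepB (none, 0, 0)
    if st.2.1 > 1 then st.2.2 + 1 else st.2.2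

-- ===== PRECONDITION & SPEC =====
-- Pre_ excludes exactly the inputs on which Python A raises ValueError: some email lacks '@'.
def Pre_group_gt_1 (L : List String) : Prop := ∀ e ∈ L, PySem.Str.isIn "@" e = true
instance (L : List String) : Decidable (Pre_group_gt_1 L) := by unfold Pre_group_gt_1; infer_instance
def pvWitness_group_gt_1 : List String := ["a.b@x", "ab+c@x", "c@y"]

def Spec_group_gt_1 (L : List String) (out : Int) : Prop := out = group_gt_1_alt L
instance (L : List String) (out : Int) : Decidable (Spec_group_gt_1 L out) := by unfold Spec_group_gt_1; infer_instance

-- ===== CLAIM (what is proved, stated in full; the proofs are below) =====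
def Claim_equal_group_gt_1 : Prop := ∀ (L : List String), Dom_group_gt_1 L → Pre_group_gt_1 L → Spec_group_gt_1 L (group_gt_1 L)

-- ===== LEMMAS AND PROOFS =====

-- the cleaned name of an email that contains '@'
def cleanF (e : String) : String := (cleanEmail e).getD ""

-- the common value both programs compute: how many distinct names occur more than once in t
def DFn (t : List String) : Nat := (t.toFinset.filter (fun v => t.count v > 1)).card

theorem clean_some (e : String) (h : PySem.Str.isIn "@" e = true) :
    cleanEmail e = some (cleanF e) := by
  have h' : PySem.Chars.find e.toList ['@'] ≠ -1 := by
    rw [PySem.Chars.find_ne_neg_one_iff]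
    have := (PySem.Str.isIn_iff_infix "@" e).mp h
    simpa using this
  simp [cleanF, cleanEmail, h']

theorem mapM_clean (L : List String) (h : ∀ e ∈ L, PySem.Str.isIn "@" e = true) :
    L.mapM cleanEmail = some (L.map cleanF) := by
  induction L with
  | nil => rfl
  | cons x xs ih =>
    have hx := clean_some x (h x (List.mem_cons_self))
    have ihx := ih (fun e he => h e (List.mem_cons_of_mem _ he))
    simp [List.mapM_cons, hx, ihx]

-- under Pre_, A's grouping loop is a pure d[k].append loop (d.modify)
theorem foldA_eq (L : List String) (d : PySem.Dict String (List String))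
    (h : ∀ e ∈ L, PySem.Str.isIn "@" e = true) :
    L.foldl (fun d email =>
      match cleanEmail email with
      | none => d
      | some c =>
        if d.contains c = false then d.insert c [email]
        else d.modify c [] (fun g => g ++ [email])) d
    = L.foldl (fun d e => d.modify (cleanF e) [] (fun g => g ++ [e])) d := by
  induction L generalizing d with
  | nil => rfl
  | cons x xs ih =>
    have hx := clean_some x (h x (List.mem_cons_self))
    simp only [List.foldl_cons, hx]
    rw [ih _ (fun e he => h e (List.mem_cons_of_mem _ he))]
    congr 1
    by_cases hc : d.contains (cleanF x) = false
    · simp [hc, PySem.Dict.modify, PySem.Dict.getD_of_not_contains d _ hc]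
    · simp [hc]

-- countP of a Nodup list is a Finset filter-card
theorem countP_nodup_eq_card (l : List String) (hnd : l.Nodup) (p : String → Bool) :
    l.countP p = (l.toFinset.filter (fun v => p v = true)).card := by
  rw [List.countP_eq_length_filter]
  rw [← List.toFinset_card_of_nodup (hnd.filter p)]
  congr 1
  ext v
  simp

-- DFn only depends on the multiset of t
theorem DFn_perm (s t : List String) (h : s.Perm t) : DFn s = DFn t := by
  unfold DFn
  rw [List.toFinset_eq_of_perm _ _ h]
  congr 1
  apply Finset.filter_congr
  intro v _
  simp [h.count_eq]

-- counting an element ≠ x is unaffected by filtering x out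
theorem count_filter_ne (t : List String) (x v : String) (h : v ≠ x) :
    (t.filter (fun y => !decide (y = x))).count v = t.count v := by
  induction t with
  | nil => rfl
  | cons y ys ih =>
    by_cases hy : y = x
    · subst hy
      rw [List.filter_cons_of_neg (by simp), ih]
      simp [Ne.symm h]
    · rw [List.filter_cons_of_pos (by simp [hy]), List.count_cons, List.count_cons, ih]

-- peeling one distinct value off DFn
theorem DFn_cons (x : String) (t : List String) :
    (DFn (x :: t) : Int)
      = (if (1 : Int) + (t.count x : Int) > 1 then 1 else 0)
        + (DFn (t.filter (fun y => decide (y ≠ x))) : Int) := by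
  have hsets : (t.filter (fun y => decide (y ≠ x))).toFinset = t.toFinset.erase x := by
    rw [List.toFinset_filter]
    rw [← Finset.filter_ne' t.toFinset x]
    apply Finset.filter_congr
    intro v _
    simp
  have hcard : DFn (t.filter (fun y => decide (y ≠ x)))
      = ((t.toFinset.erase x).filter (fun v => t.count v > 1)).card := by
    unfold DFn
    rw [hsets]
    congr 1
    apply Finset.filter_congr
    intro v hv
    have hvx : v ≠ x := Finset.ne_of_mem_erase hv
    simp only [ne_eq, decide_not]
    rw [count_filter_ne t x v hvx]
  have hmain : DFn (x :: t)
      = (if 0 < t.count x then 1 else 0)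
        + ((t.toFinset.erase x).filter (fun v => t.count v > 1)).card := by
    unfold DFn
    have h1 : (x :: t).toFinset = insert x (t.toFinset.erase x) := by
      ext v
      simp
      tauto
    rw [h1, Finset.filter_insert]
    have hx : x ∉ (t.toFinset.erase x).filter (fun v => (x :: t).count v > 1) := by
      simp
    have hcongr : (t.toFinset.erase x).filter (fun v => (x :: t).count v > 1)
        = (t.toFinset.erase x).filter (fun v => t.count v > 1) := by
      apply Finset.filter_congr
      intro v hv
      have hvx : v ≠ x := Finset.ne_of_mem_erase hv
      simp [Ne.symm hvx]
    by_cases hc : 0 < t.count x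
    · have hgt : (x :: t).count x > 1 := by
        rw [List.count_cons_self]
        omega
      rw [if_pos hgt, Finset.card_insert_of_notMem hx, hcongr, if_pos hc]
      omega
    · have hle : ¬ ((x :: t).count x > 1) := by
        rw [List.count_cons_self]
        omega
      rw [if_neg hle, hcongr, if_neg hc]
      omega
  rw [hmain, hcard]
  rcases Nat.eq_zero_or_pos (t.count x) with hc | hc
  · simp [hc]
  · have hc' : (0 : Int) < (t.count x : Int) := by exact_mod_cast hc
    rw [if_pos hc, if_pos (by omega : (1 : Int) + (t.count x : Int) > 1)]
    push_cast
    ring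

-- Source B's loop over a sorted tail, with an open run of c
theorem runLemma (s : List String) (c : String) (run cnt : Int)
    (h : (c :: s).Pairwise (fun a b => a ≤ b)) :
    (let st := s.foldl stepB (some c, run, cnt);
     if st.2.1 > 1 then st.2.2 + 1 else st.2.2)
      = cnt + (if run + (s.count c : Int) > 1 then 1 else 0)
          + (DFn (s.filter (fun y => decide (y ≠ c))) : Int) := by
  induction s generalizing c run cnt with
  | nil =>
    simp only [List.foldl_nil, List.filter_nil, List.count_nil]
    simp [DFn]
    split_ifs <;> omega
  | cons x xs ih =>
    by_cases hxc : x = c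
    · subst hxc
      have h' : (x :: xs).Pairwise (fun a b => a ≤ b) := h.of_cons
      have hstep : stepB (some x, run, cnt) x = (some x, run + 1, cnt) := by
        simp [stepB]
      simp only [List.foldl_cons, hstep]
      rw [ih x (run + 1) cnt h']
      have hfil : (x :: xs).filter (fun y => decide (y ≠ x))
          = xs.filter (fun y => decide (y ≠ x)) := by
        simp
      rw [hfil, List.count_cons_self]
      have harith : run + 1 + (xs.count x : Int) = run + ((xs.count x : Int) + 1) := by ring
      rw [harith]
      push_cast
      ring
    · rw [List.pairwise_cons] at h
      obtain ⟨h1, h2⟩ := h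
      have hclex : c ≤ x := h1 x List.mem_cons_self
      have hclt : c < x := lt_of_le_of_ne hclex (fun hcx => hxc hcx.symm)
      have hxle : ∀ y ∈ xs, x ≤ y := (List.pairwise_cons.mp h2).1
      have hne : ∀ y ∈ x :: xs, y ≠ c := by
        intro y hy
        rcases List.mem_cons.mp hy with hy | hy
        · subst hy; exact hxc
        · exact fun hyc => absurd (lt_of_lt_of_le hclt (hxle y hy)) (by rw [hyc]; exact lt_irrefl c)
      have hcount : (x :: xs).count c = 0 :=
        List.count_eq_zero.mpr (fun hmem => hne c hmem rfl)
      have hfil : (x :: xs).filter (fun y => decide (y ≠ c)) = x :: xs :=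
        List.filter_eq_self.mpr (fun y hy => by simp [hne y hy])
      have hstep : stepB (some c, run, cnt)
          x = (some x, 1, if run > 1 then cnt + 1 else cnt) := by
        simp [stepB, hxc]
      simp only [List.foldl_cons, hstep]
      rw [ih x 1 (if run > 1 then cnt + 1 else cnt) h2]
      rw [hcount, hfil, DFn_cons x xs]
      have hcnt : (if run > 1 then cnt + 1 else cnt) = cnt + (if run > 1 then (1 : Int) else 0) := by
        split_ifs <;> ring
      have hr : (if run + ((0 : Nat) : Int) > 1 then (1 : Int) else 0) = (if run > 1 then (1 : Int) else 0) := by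
        norm_num
      rw [hcnt, hr]
      ring

theorem B_char (L : List String) (hpre : Pre_group_gt_1 L) :
    group_gt_1_alt L = (DFn (L.map cleanF) : Int) := by
  unfold group_gt_1_alt
  rw [mapM_clean L hpre]
  have hperm := PySem.List.sorted_perm (L.map cleanF) (fun x => x) false
  have hpw := PySem.List.sorted_pairwise (L.map cleanF) (fun x => x)
  cases hs : PySem.List.sorted (L.map cleanF) (fun x => x) false with
  | nil =>
    have hms : L.map cleanF = [] := by
      have := hperm
      rw [hs] at this
      exact (List.Perm.nil_eq this).symm
    rw [hms]
    simp [DFn]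
    rfl
  | cons x rest =>
    rw [hs] at hperm hpw
    have hstep : stepB (none, 0, 0) x = (some x, 1, 0) := by
      simp [stepB]
    simp only [hs, List.foldl_cons, hstep]
    rw [runLemma rest x 1 0 hpw]
    rw [← DFn_perm (x :: rest) (L.map cleanF) hperm]
    rw [DFn_cons x rest]
    ring

theorem A_char (L : List String) (hpre : Pre_group_gt_1 L) (hne : L ≠ []) :
    group_gt_1 L = (DFn (L.map cleanF) : Int) := by
  unfold group_gt_1
  simp only [hne, if_false]
  rw [foldA_eq L _ hpre]
  set ms := L.map cleanF with hms
  set d := L.foldl (fun d e => d.modify (cleanF e) [] (fun g => g ++ [e])) PySem.Dict.empty with hd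
  have hnd : d.keys.Nodup :=
    PySem.Dict.nodup_keys_foldl_modify_key L cleanF []
      (fun _ e g => g ++ [e]) PySem.Dict.empty (by simp [PySem.Dict.keys_empty])
  have hkeys : d.keys = PySem.Set.ofList ms := by
    rw [hd, PySem.Dict.keys_foldl_modify_key L cleanF [] (fun _ e g => g ++ [e]) PySem.Dict.empty]
    simp [PySem.Set.update, PySem.Set.ofList_eq_foldl, PySem.Dict.keys_empty, hms]
  have hgetD : ∀ k, (d.getD k []).length = ms.count k := by
    intro k
    have h1 := PySem.Dict.getD_foldl_modify_append (L.map (fun e => (cleanF e, e)))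
      PySem.Dict.empty k
    rw [List.foldl_map] at h1
    rw [hd, h1]
    rw [hms, List.count_eq_countP, List.countP_eq_length_filter, List.filter_map]
    simp [List.filter_map, Function.comp_def]
  rw [PySem.Dict.values_eq_map_keys d hnd []]
  rw [show (fun (cnt : Int) (g : List String) => if g.length > 1 then cnt + 1 else cnt)
      = (fun (acc : Int) (g : List String) =>
          if (fun g : List String => decide (g.length > 1)) g = true then acc + 1 else acc) from by
    funext c g; by_cases h : g.length > 1 <;> simp [h]]
  rw [PySem.List.foldl_count_if (fun g : List String => decide (g.length > 1))]
  rw [List.countP_map, zero_add]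
  have hcntP : (d.keys.countP ((fun g : List String => decide (g.length > 1)) ∘ fun k => d.getD k []))
      = d.keys.countP (fun k => decide (ms.count k > 1)) := by
    apply List.countP_congr
    intro k _
    simp [hgetD k]
  rw [hcntP, hkeys]
  rw [countP_nodup_eq_card (PySem.Set.ofList ms) (PySem.Set.nodup_ofList ms)
    (fun k => decide (ms.count k > 1))]
  unfold DFn
  have hfs : (PySem.Set.ofList ms).toFinset = ms.toFinset := by
    ext v
    simp [PySem.Set.mem_ofList]
  rw [hfs]
  have hfc : (ms.toFinset.filter (fun v => decide (ms.count v > 1) = true))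
      = ms.toFinset.filter (fun v => ms.count v > 1) := by
    apply Finset.filter_congr
    intro v _
    simp
  rw [hfc]

-- ===== VERDICT (by name: the statement is the Claim_ definition above) =====
theorem group_gt_1_spec : Claim_equal_group_gt_1 := by
  intro L _ hpre
  unfold Spec_group_gt_1
  by_cases hL : L = []
  · subst hL; decide
  · rw [A_char L hpre hL, B_char L hpre]
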